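-- pv_equiv track=rewrite | github.com/richardzhux/iching | src/iching/integrations/interpretation_repository.py | _clean_english_structured_text
-- ===== SOURCE A (Python) =====
-- from typing import Dict, Iterable, List, Optional, Sequence, Tuple
--
-- def _clean_english_structured_text(raw: object) -> Optional[str]:
--     if not isinstance(raw, str):
--         return None
--     normalized = (
--         raw.replace("\r\n", "\n")
--         .replace("\ufeff", "")
--         .replace("\ufffc", "")
--     )
--     lines = [line.rstrip() for line in normalized.split("\n")]
--     while lines and not lines[0].strip():
--         lines.pop(0)
--     while lines and not lines[-1].strip():
--         lines.pop()
--     if not lines: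
--         return None
--
--     squashed: List[str] = []
--     previous_blank = False
--     for line in lines:
--         blank = not line.strip()
--         if blank and previous_blank:
--             continue
--         squashed.append(line)
--         previous_blank = blank
--
--     text = "\n".join(squashed).strip()
--     return text or None
-- ===== SOURCE B (Python) =====
-- from typing import Optional
--
--
-- def _clean_english_structured_text(raw: object) -> Optional[str]:
--     if not isinstance(raw, str):
--         return None
--     normalized = (
--         raw.replace("\r\n", "\n")
--         .replace("\ufeff", "")
--         .replace("\ufffc", "")
--     )
--     lines = [line.rstrip() for line in normalized.split("\n")]
--     # Group consecutive non-blank lines into paragraphs; blank separators vanish.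
--     paragraphs = []
--     current = []
--     for line in lines:
--         if line:
--             current.append(line)
--         elif current:
--             paragraphs.append(current)
--             current = []
--     if current:
--         paragraphs.append(current)
--     text = "\n\n".join("\n".join(p) for p in paragraphs).strip()
--     return text or None
-- ===== Notes on version B (the rewrite author's own statement) =====
-- stated objective: simpler
-- what changed: B drops A's two while-pop trim loops and the previous_blank squash loop, instead grouping consecutive non-blank lines into paragraphs in one pass and joining the paragraphs with a double-newline separator.
import Mathlib
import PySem

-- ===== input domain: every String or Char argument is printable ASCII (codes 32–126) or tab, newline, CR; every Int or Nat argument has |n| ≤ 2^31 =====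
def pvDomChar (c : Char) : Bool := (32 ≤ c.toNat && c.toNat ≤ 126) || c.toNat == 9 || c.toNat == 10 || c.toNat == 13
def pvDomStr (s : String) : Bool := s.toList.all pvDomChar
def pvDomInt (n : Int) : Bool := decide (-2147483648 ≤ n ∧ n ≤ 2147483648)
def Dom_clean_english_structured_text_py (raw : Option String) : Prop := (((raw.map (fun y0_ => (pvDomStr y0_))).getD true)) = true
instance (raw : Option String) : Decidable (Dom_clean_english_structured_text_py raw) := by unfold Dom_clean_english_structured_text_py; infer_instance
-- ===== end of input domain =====

-- B replaces A's two while-pop trims and the previous_blank squash loop by one grouping of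
-- non-blank lines into paragraphs joined with "\n\n" (simpler; return value equivalence proved).

-- shared helper: both sources compute `normalized` and the rstripped `lines` with identical code
def cestLines (s : String) : List (List Char) :=
  let normalized := PySem.Str.replace (PySem.Str.replace (PySem.Str.replace s "\r\n" "\n") "\ufeff" "") "\ufffc" ""
  (PySem.Chars.splitOn normalized.toList ['\n']).map PySem.Chars.rstrip

-- ===== PORT A =====
-- while lines and not lines[0].strip(): lines.pop(0)
def cestA_trimFront : List (List Char) → List (List Char)
  | [] => []
  | l :: ls => if PySem.Chars.strip l = [] then cestA_trimFront ls else l :: ls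

-- while lines and not lines[-1].strip(): lines.pop()
def cestA_trimBack (ls : List (List Char)) : List (List Char) :=
  match _h : ls.getLast? with
  | none => []
  | some l =>
    if PySem.Chars.strip l = [] then cestA_trimBack ls.dropLast else ls
termination_by ls.length
decreasing_by
  have hne : ls ≠ [] := by intro e; subst e; simp at _h
  have := List.length_pos_of_ne_nil hne
  simp [List.length_dropLast]; omega

-- the `for line in lines` squash loop, state = (squashed, previous_blank)
def cestA_step (st : List (List Char) × Bool) (line : List Char) : List (List Char) × Bool :=
  let blank := decide (PySem.Chars.strip line = [])
  if blank && st.2 then st else (st.1 ++ [line], blank)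

def clean_english_structured_text_py (raw : Option String) : Option String :=
  match raw with
  | none => none
  | some s =>
    let lines := cestA_trimBack (cestA_trimFront (cestLines s))
    if lines = [] then none
    else
      let squashed := (lines.foldl cestA_step ([], false)).1
      let text := PySem.Chars.strip (PySem.Chars.join ['\n'] squashed)
      if text = [] then none else some (String.ofList text)

-- ===== PORT B =====
-- the `for line in lines` grouping loop, state = (paragraphs, current)
def cestB_step (st : List (List (List Char)) × List (List Char)) (line : List Char) :
    List (List (List Char)) × List (List Char) :=
  if line ≠ [] then (st.1, st.2 ++ [line])
  else if st.2 ≠ [] then (st.1 ++ [st.2], []) else st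

-- the trailing `if current: paragraphs.append(current)`
def cestB_close (st : List (List (List Char)) × List (List Char)) : List (List (List Char)) :=
  if st.2 ≠ [] then st.1 ++ [st.2] else st.1

def cestB_paras (lines : List (List Char)) : List (List (List Char)) :=
  cestB_close (lines.foldl cestB_step ([], []))

def clean_english_structured_text_py_alt (raw : Option String) : Option String :=
  match raw with
  | none => none
  | some s =>
    let text := PySem.Chars.strip (PySem.Chars.join ['\n', '\n']
      ((cestB_paras (cestLines s)).map (PySem.Chars.join ['\n'])))
    if text = [] then none else some (String.ofList text)

-- ===== PRECONDITION & SPEC =====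
def Spec_clean_english_structured_text_py (raw : Option String) (out : Option String) : Prop := out = clean_english_structured_text_py_alt raw
instance (raw : Option String) (out : Option String) : Decidable (Spec_clean_english_structured_text_py raw out) := by unfold Spec_clean_english_structured_text_py; infer_instance

-- ===== CLAIM (what is proved, stated in full; the proofs are below) =====
def Claim_equal_clean_english_structured_text_py : Prop := ∀ (raw : Option String), Dom_clean_english_structured_text_py raw → Spec_clean_english_structured_text_py raw (clean_english_structured_text_py raw)

-- ===== LEMMAS AND PROOFS =====

-- blank test specialised to already-rstripped lines: blank ↔ the line is empty
def cestD (l : List Char) : Bool := decide (l = [])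

-- A's squash step with the blank test replaced by emptiness (valid on rstripped lines)
def cestSqN (st : List (List Char) × Bool) (line : List Char) : List (List Char) × Bool :=
  if cestD line && st.2 then st else (st.1 ++ [line], cestD line)

-- a squashed run of paragraphs: paragraphs separated by single blank lines
def cestI (ps : List (List (List Char))) : List (List Char) :=
  List.intercalate [([] : List Char)] ps

lemma cest_dropWhile_forall_nil {α} (p : α → Bool) (l : List α)
    (h : ∀ a ∈ l.dropWhile p, p a) : l.dropWhile p = [] := by
  induction l with
  | nil => simp
  | cons a t ih =>
    by_cases hp : p a
    · simpa [hp] using ih (by simpa [hp] using h)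
    · exact absurd (h a (by simp [hp])) hp

lemma cest_dropWhile_head {α} (p : α → Bool) (l : List α) (a : α) (t : List α)
    (h : l.dropWhile p = a :: t) : p a = false := by
  induction l with
  | nil => simp at h
  | cons b l ih =>
    by_cases hb : p b
    · exact ih (by simpa [List.dropWhile_cons, hb] using h)
    · rw [List.dropWhile_cons] at h
      simp only [hb, Bool.false_eq_true, if_false, List.cons.injEq] at h
      rw [h.1] at hb
      simpa using hb

lemma cest_rstrip_eq_nil_iff (y : List Char) :
    PySem.Chars.rstrip y = [] ↔ ∀ c ∈ y, PySem.Chars.isspace c := by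
  simp [PySem.Chars.rstrip, List.dropWhile_eq_nil_iff]

lemma cest_strip_eq_nil_iff (l : List Char) :
    PySem.Chars.strip l = [] ↔ ∀ c ∈ l, PySem.Chars.isspace c := by
  rw [PySem.Chars.strip, cest_rstrip_eq_nil_iff]
  constructor
  · intro h c hc
    have hsplit := List.takeWhile_append_dropWhile (p := PySem.Chars.isspace) (l := l)
    rw [← hsplit] at hc
    rcases List.mem_append.1 hc with h1 | h2
    · exact List.mem_takeWhile_imp h1
    · exact h c h2
  · intro h c hc
    exact h c (List.dropWhile_subset _ hc)

lemma cest_rstrip_blank_iff (x : List Char) :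
    PySem.Chars.strip (PySem.Chars.rstrip x) = [] ↔ PySem.Chars.rstrip x = [] := by
  constructor
  · intro h
    rw [cest_strip_eq_nil_iff] at h
    rw [PySem.Chars.rstrip] at h ⊢
    rw [List.reverse_eq_nil_iff]
    exact cest_dropWhile_forall_nil _ _ (fun a ha => h a (by simpa using ha))
  · intro h; rw [h]; rfl

-- every element of `cestLines s` is rstripped: blank ↔ []
lemma cestLines_blank (s : String) :
    ∀ l ∈ cestLines s, (PySem.Chars.strip l = [] ↔ l = []) := by
  intro l hl
  rw [cestLines] at hl
  simp only [List.mem_map] at hl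
  obtain ⟨x, -, rfl⟩ := hl
  exact cest_rstrip_blank_iff x

lemma cest_trimFront_eq (ls : List (List Char))
    (H : ∀ l ∈ ls, (PySem.Chars.strip l = [] ↔ l = [])) :
    cestA_trimFront ls = ls.dropWhile cestD := by
  induction ls with
  | nil => rfl
  | cons l ls ih =>
    have hl := H l (by simp)
    by_cases h : l = []
    · rw [cestA_trimFront, if_pos (hl.mpr h), List.dropWhile_cons_of_pos (by simp [cestD, h])]
      exact ih (fun x hx => H x (by simp [hx]))
    · rw [cestA_trimFront, if_neg (fun hh => h (hl.mp hh)),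
        List.dropWhile_cons_of_neg (by simp [cestD, h])]

lemma cest_trimBack_eq (ls : List (List Char))
    (H : ∀ l ∈ ls, (PySem.Chars.strip l = [] ↔ l = [])) :
    cestA_trimBack ls = (ls.reverse.dropWhile cestD).reverse := by
  induction hn : ls.length using Nat.strong_induction_on generalizing ls with
  | _ n ih =>
  rw [cestA_trimBack]
  split
  · next heq =>
    have : ls = [] := by simpa using heq
    subst this; rfl
  · next l heq =>
    have hmem : l ∈ ls := List.mem_of_getLast? heq
    have hsplit : ls.dropLast ++ [l] = ls := List.dropLast_append_getLast? l heq
    have hrev : ls.reverse = l :: ls.dropLast.reverse := by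
      conv_lhs => rw [← hsplit]
      simp
    have hl := H l hmem
    by_cases h : PySem.Chars.strip l = []
    · have hlnil : l = [] := hl.mp h
      rw [if_pos h, hrev, List.dropWhile_cons_of_pos (by simp [cestD, hlnil])]
      have hlen : ls.dropLast.length < n := by
        subst hn
        have : ls ≠ [] := by intro e; subst e; simp at heq
        have := List.length_pos_of_ne_nil this
        simp [List.length_dropLast]; omega
      exact ih _ hlen _ (fun x hx => H x (List.mem_of_mem_dropLast hx)) rfl
    · have hlne : l ≠ [] := fun e => h (hl.mpr e)
      rw [if_neg h, hrev, List.dropWhile_cons_of_neg (by simp [cestD, hlne])]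
      rw [List.reverse_cons, List.reverse_reverse, hsplit]

lemma cest_foldA_eq (ls : List (List Char)) (st : List (List Char) × Bool)
    (H : ∀ l ∈ ls, (PySem.Chars.strip l = [] ↔ l = [])) :
    ls.foldl cestA_step st = ls.foldl cestSqN st := by
  induction ls generalizing st with
  | nil => rfl
  | cons l ls ih =>
    have hl : decide (PySem.Chars.strip l = []) = cestD l := by
      rw [cestD]; exact decide_eq_decide.mpr (H l (by simp))
    have hstep : cestA_step st l = cestSqN st l := by
      rw [cestA_step, cestSqN, hl]
    rw [List.foldl_cons, List.foldl_cons, hstep]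
    exact ih _ (fun x hx => H x (by simp [hx]))

lemma cestI_nil : cestI [] = [] := by simp [cestI, List.intercalate]

lemma cestI_single (x : List (List Char)) : cestI [x] = x := by simp [cestI, List.intercalate]

lemma cestI_cons (x : List (List Char)) (l : List (List (List Char))) (h : l ≠ []) :
    cestI (x :: l) = x ++ [([] : List Char)] ++ cestI l := by
  obtain ⟨y, t, rfl⟩ := List.exists_cons_of_ne_nil h
  simp [cestI, List.intercalate, List.intersperse]

lemma cestI_append_single (ps : List (List (List Char))) (x : List (List Char)) (h : ps ≠ []) :
    cestI (ps ++ [x]) = cestI ps ++ [([] : List Char)] ++ x := by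
  induction ps with
  | nil => exact absurd rfl h
  | cons p ps ih =>
    by_cases hps : ps = []
    · subst hps
      rw [List.singleton_append, cestI_cons _ _ (by simp), cestI_single, cestI_single]
    · rw [List.cons_append, cestI_cons _ _ (by simp [hps]), cestI_cons _ _ hps, ih hps]
      simp [List.append_assoc]

lemma cestI_snoc_grow (ps : List (List (List Char))) (x : List (List Char)) (l : List Char) :
    cestI (ps ++ [x ++ [l]]) = cestI (ps ++ [x]) ++ [l] := by
  by_cases h : ps = []
  · subst h; rw [List.nil_append, List.nil_append, cestI_single, cestI_single]
  · rw [cestI_append_single _ _ h, cestI_append_single _ _ h]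
    simp [List.append_assoc]

lemma cest_getLast?_tail {α : Type} (l : α) (ts : List α) (x : α)
    (h : ts.getLast? = some x) : (l :: ts).getLast? = some x := by
  cases ts with
  | nil => simp at h
  | cons b t => simpa [List.getLast?_cons_cons] using h

-- the heart: A's squash fold equals the paragraph decomposition of B's fold
lemma cest_fold_rel (ts : List (List Char)) (ps : List (List (List Char)))
    (cur : List (List Char)) (acc : List (List Char)) (prev : Bool)
    (hlast : ∀ x, ts.getLast? = some x → x ≠ [])
    (hinv : (cur ≠ [] ∧ prev = false ∧ acc = cestI (ps ++ [cur])) ∨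
            (cur = [] ∧ ps ≠ [] ∧ prev = true ∧ acc = cestI ps ++ [([] : List Char)]))
    (hbase : ts = [] → cur ≠ []) :
    (ts.foldl cestSqN (acc, prev)).1 = cestI (cestB_close (ts.foldl cestB_step (ps, cur))) := by
  induction ts generalizing ps cur acc prev with
  | nil =>
    rcases hinv with ⟨hc, -, ha⟩ | ⟨hc, -, -, -⟩
    · simp only [List.foldl_nil, cestB_close, if_pos hc]
      exact ha
    · exact absurd hc (hbase rfl)
  | cons l ts ih =>
    have hlast' : ∀ x, ts.getLast? = some x → x ≠ [] :=
      fun x hx => hlast x (cest_getLast?_tail l ts x hx)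
    rw [List.foldl_cons, List.foldl_cons]
    rcases hinv with ⟨hc, hp, ha⟩ | ⟨hc, hps, hp, ha⟩
    · by_cases hl : l = []
      · have hA : cestSqN (acc, prev) l = (acc ++ [l], true) := by
          rw [cestSqN]; simp [cestD, hl, hp]
        have hB : cestB_step (ps, cur) l = (ps ++ [cur], []) := by
          rw [cestB_step]; simp [hl, hc]
        rw [hA, hB]
        refine ih (ps ++ [cur]) [] (acc ++ [l]) true hlast' (Or.inr ⟨rfl, by simp, rfl, ?_⟩) ?_
        · rw [ha, hl]
        · intro hts
          exact absurd (hlast l (by simp [hts])) (by simp [hl])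
      · have hA : cestSqN (acc, prev) l = (acc ++ [l], cestD l) := by
          rw [cestSqN]; simp [hp]
        have hB : cestB_step (ps, cur) l = (ps, cur ++ [l]) := by
          rw [cestB_step]; simp [hl]
        rw [hA, hB]
        refine ih ps (cur ++ [l]) (acc ++ [l]) (cestD l) hlast'
          (Or.inl ⟨by simp, by simp [cestD, hl], ?_⟩) (fun _ => by simp)
        rw [ha, cestI_snoc_grow]
    · by_cases hl : l = []
      · have hA : cestSqN (acc, prev) l = (acc, prev) := by
          rw [cestSqN]; simp [cestD, hl, hp]
        have hB : cestB_step (ps, cur) l = (ps, cur) := by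
          rw [cestB_step]; simp [hl, hc]
        rw [hA, hB]
        refine ih ps cur acc prev hlast' (Or.inr ⟨hc, hps, hp, ha⟩) ?_
        intro hts
        exact absurd (hlast l (by simp [hts])) (by simp [hl])
      · have hA : cestSqN (acc, prev) l = (acc ++ [l], cestD l) := by
          rw [cestSqN]; simp [cestD, hl]
        have hB : cestB_step (ps, cur) l = (ps, [l]) := by
          rw [cestB_step]; simp [hl, hc]
        rw [hA, hB]
        refine ih ps [l] (acc ++ [l]) (cestD l) hlast'
          (Or.inl ⟨by simp, by simp [cestD, hl], ?_⟩) (fun _ => by simp)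
        rw [ha, cestI_append_single _ _ hps]

-- B's fold ignores leading blank lines
lemma cestB_fold_blanks_init (ls : List (List Char)) (h : ∀ l ∈ ls, l = []) :
    ls.foldl cestB_step ([], []) = ([], []) := by
  induction ls with
  | nil => rfl
  | cons l ls ih =>
    have hl : l = [] := h l (by simp)
    rw [List.foldl_cons]
    have : cestB_step ([], []) l = ([], []) := by rw [cestB_step]; simp [hl]
    rw [this]
    exact ih (fun x hx => h x (by simp [hx]))

-- B's result ignores trailing blank lines
lemma cestB_close_blanks (bs : List (List Char)) (h : ∀ l ∈ bs, l = [])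
    (st : List (List (List Char)) × List (List Char)) :
    cestB_close (bs.foldl cestB_step st) = cestB_close st := by
  induction bs generalizing st with
  | nil => rfl
  | cons l bs ih =>
    have hl : l = [] := h l (by simp)
    rw [List.foldl_cons]
    by_cases hc : st.2 = []
    · have : cestB_step st l = st := by rw [cestB_step]; simp [hl, hc]
      rw [this]
      exact ih (fun x hx => h x (by simp [hx])) st
    · have hstep : cestB_step st l = (st.1 ++ [st.2], []) := by rw [cestB_step]; simp [hl, hc]
      rw [hstep, ih (fun x hx => h x (by simp [hx]))]
      rw [cestB_close, cestB_close]
      simp [hc]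

-- every paragraph B builds is non-empty
lemma cestB_paras_ne_nil (ls : List (List Char)) (st : List (List (List Char)) × List (List Char))
    (h : ∀ p ∈ st.1, p ≠ []) :
    ∀ p ∈ cestB_close (ls.foldl cestB_step st), p ≠ [] := by
  induction ls generalizing st with
  | nil =>
    intro p hp
    rw [List.foldl_nil, cestB_close] at hp
    by_cases hc : st.2 = []
    · exact h p (by simpa [hc] using hp)
    · rw [if_pos hc] at hp
      rcases List.mem_append.1 hp with h1 | h2
      · exact h p h1
      · rw [List.mem_singleton] at h2; subst h2; exact hc
  | cons l ls ih =>
    rw [List.foldl_cons]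
    apply ih
    by_cases hl : l = []
    · by_cases hc : st.2 = []
      · have : cestB_step st l = st := by rw [cestB_step]; simp [hl, hc]
        rw [this]; exact h
      · have : cestB_step st l = (st.1 ++ [st.2], []) := by rw [cestB_step]; simp [hl, hc]
        rw [this]
        intro p hp
        rcases List.mem_append.1 hp with h1 | h2
        · exact h p h1
        · rw [List.mem_singleton] at h2; subst h2; exact hc
    · have : cestB_step st l = (st.1, st.2 ++ [l]) := by rw [cestB_step]; simp [hl]
      rw [this]; exact h

lemma cest_join_append (sep : List Char) (xs ys : List (List Char)) (hx : xs ≠ []) (hy : ys ≠ []) :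
    PySem.Chars.join sep (xs ++ ys) = PySem.Chars.join sep xs ++ sep ++ PySem.Chars.join sep ys := by
  induction xs with
  | nil => exact absurd rfl hx
  | cons x xs ih =>
    obtain ⟨y, t, rfl⟩ := List.exists_cons_of_ne_nil hy
    by_cases hxs : xs = []
    · subst hxs
      rw [List.singleton_append, PySem.Chars.join_cons_cons, PySem.Chars.join_singleton]
    · obtain ⟨x2, xt, rfl⟩ := List.exists_cons_of_ne_nil hxs
      rw [List.cons_append, List.cons_append, PySem.Chars.join_cons_cons,
        PySem.Chars.join_cons_cons, ← List.cons_append, ih (by simp)]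
      simp [List.append_assoc]

lemma cestI_ne_nil (ps : List (List (List Char))) (h : ∀ p ∈ ps, p ≠ []) (hne : ps ≠ []) :
    cestI ps ≠ [] := by
  obtain ⟨p, t, rfl⟩ := List.exists_cons_of_ne_nil hne
  by_cases ht : t = []
  · subst ht; rw [cestI_single]; exact h p (by simp)
  · rw [cestI_cons _ _ ht]
    intro e
    rw [List.append_assoc, List.append_eq_nil_iff] at e
    exact h p (by simp) e.1

-- joining a blank-separated run with "\n" = joining the paragraphs with "\n\n"
lemma cest_join_inter (ps : List (List (List Char))) (h : ∀ p ∈ ps, p ≠ []) :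
    PySem.Chars.join ['\n'] (cestI ps) =
      PySem.Chars.join ['\n', '\n'] (ps.map (PySem.Chars.join ['\n'])) := by
  induction ps with
  | nil => rw [cestI_nil]; rfl
  | cons p ps ih =>
    by_cases hps : ps = []
    · subst hps
      rw [cestI_single, List.map_singleton, PySem.Chars.join_singleton]
    · have hp : p ≠ [] := h p (by simp)
      have hps' : ∀ q ∈ ps, q ≠ [] := fun q hq => h q (by simp [hq])
      have hInl : cestI ps ≠ [] := cestI_ne_nil ps hps' hps
      obtain ⟨z, zs, hz⟩ := List.exists_cons_of_ne_nil hInl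
      obtain ⟨q, qt, rfl⟩ := List.exists_cons_of_ne_nil hps
      rw [cestI_cons _ _ (by simp), List.append_assoc, List.singleton_append,
        cest_join_append _ p _ hp (by simp), hz, PySem.Chars.join_cons_cons, ← hz, ih hps',
        List.map_cons (l := q :: qt), List.map_cons, PySem.Chars.join_cons_cons]
      simp [List.append_assoc]

-- ===== VERDICT (by name: the statement is the Claim_ definition above) =====
theorem clean_english_structured_text_py_spec : Claim_equal_clean_english_structured_text_py := by
  intro raw _
  rw [Spec_clean_english_structured_text_py]
  cases raw with
  | none => rfl
  | some s =>
    have H := cestLines_blank s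
    have Hm : ∀ l ∈ (cestLines s).dropWhile cestD, (PySem.Chars.strip l = [] ↔ l = []) :=
      fun l hl => H l (List.dropWhile_subset _ hl)
    have hAB : cestA_trimBack (cestA_trimFront (cestLines s)) =
        (((cestLines s).dropWhile cestD).reverse.dropWhile cestD).reverse := by
      rw [cest_trimFront_eq _ H, cest_trimBack_eq _ Hm]
    simp only [clean_english_structured_text_py, clean_english_structured_text_py_alt, hAB]
    by_cases hts : (((cestLines s).dropWhile cestD).reverse.dropWhile cestD).reverse = []
    · -- everything is blank: both sides return none
      have hdw : ((cestLines s).dropWhile cestD).reverse.dropWhile cestD = [] := by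
        simpa using congrArg List.reverse hts
      have hm : (cestLines s).dropWhile cestD = [] := by
        cases hm' : (cestLines s).dropWhile cestD with
        | nil => rfl
        | cons a t =>
          have ha : cestD a = false := cest_dropWhile_head cestD (cestLines s) a t hm'
          have : cestD a = true := by
            have := (List.dropWhile_eq_nil_iff).1 hdw a (by simp [hm'])
            exact this
          rw [ha] at this; exact absurd this (by simp)
      have hall : ∀ l ∈ cestLines s, l = [] := by
        intro l hl
        have := (List.dropWhile_eq_nil_iff).1 hm l hl
        simpa [cestD] using this
      rw [if_pos hts]
      rw [cestB_paras, cestB_fold_blanks_init _ hall]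
      rw [show cestB_close ([], []) = [] from rfl]
      rfl
    · -- the trimmed list is non-empty
      rw [if_neg hts]
      -- decompose: m = ts ++ bs, ls = as ++ (ts ++ bs)
      have hm_decomp : (cestLines s).dropWhile cestD =
          (((cestLines s).dropWhile cestD).reverse.dropWhile cestD).reverse ++
          (((cestLines s).dropWhile cestD).reverse.takeWhile cestD).reverse := by
        conv_lhs => rw [← List.reverse_reverse ((cestLines s).dropWhile cestD)]
        conv_lhs => rw [← List.takeWhile_append_dropWhile (p := cestD)
          (l := ((cestLines s).dropWhile cestD).reverse)]
        rw [List.reverse_append]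
      have hbs : ∀ l ∈ (((cestLines s).dropWhile cestD).reverse.takeWhile cestD).reverse, l = [] := by
        intro l hl
        rw [List.mem_reverse] at hl
        have := List.mem_takeWhile_imp hl
        simpa [cestD] using this
      have hls_decomp : cestLines s = (cestLines s).takeWhile cestD ++
          ((((cestLines s).dropWhile cestD).reverse.dropWhile cestD).reverse ++
           (((cestLines s).dropWhile cestD).reverse.takeWhile cestD).reverse) := by
        conv_lhs => rw [← List.takeWhile_append_dropWhile (p := cestD) (l := cestLines s)]
        rw [← hm_decomp]
      have has : ∀ l ∈ (cestLines s).takeWhile cestD, l = [] := by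
        intro l hl
        have := List.mem_takeWhile_imp hl
        simpa [cestD] using this
      obtain ⟨h0, ts', hts0⟩ := List.exists_cons_of_ne_nil hts
      have hmcons : (cestLines s).dropWhile cestD =
          h0 :: (ts' ++ (((cestLines s).dropWhile cestD).reverse.takeWhile cestD).reverse) := by
        conv_lhs => rw [hm_decomp]
        rw [hts0, List.cons_append]
      have hD0 : cestD h0 = false := cest_dropWhile_head cestD (cestLines s) h0 _ hmcons
      have hh0 : h0 ≠ [] := by simpa [cestD] using hD0
      have hlast : ∀ x, ((((cestLines s).dropWhile cestD).reverse.dropWhile cestD).reverse).getLast? = some x → x ≠ [] := by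
        intro x hx
        rw [List.getLast?_reverse] at hx
        cases hdw : ((cestLines s).dropWhile cestD).reverse.dropWhile cestD with
        | nil => rw [hdw] at hx; simp at hx
        | cons a t =>
          rw [hdw] at hx
          simp only [List.head?_cons, Option.some.injEq] at hx
          subst hx
          have := cest_dropWhile_head cestD _ a t hdw
          simpa [cestD] using this
      have hlast' : ∀ x, ts'.getLast? = some x → x ≠ [] := by
        intro x hx
        exact hlast x (by rw [hts0]; exact cest_getLast?_tail h0 ts' x hx)
      have Hts : ∀ l ∈ (((cestLines s).dropWhile cestD).reverse.dropWhile cestD).reverse,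
          (PySem.Chars.strip l = [] ↔ l = []) := by
        intro l hl
        refine Hm l ?_
        rw [hm_decomp]
        exact List.mem_append.2 (Or.inl hl)
      -- A's squashed run
      have hA1 : ((((cestLines s).dropWhile cestD).reverse.dropWhile cestD).reverse.foldl cestA_step ([], false)).1 =
          cestI (cestB_close (ts'.foldl cestB_step ([], [h0]))) := by
        rw [cest_foldA_eq _ _ Hts, hts0, List.foldl_cons]
        rw [show cestSqN ([], false) h0 = ([h0], cestD h0) from by rw [cestSqN]; simp]
        rw [hD0]
        exact cest_fold_rel ts' [] [h0] [h0] false hlast'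
          (Or.inl ⟨by simp, rfl, (cestI_single [h0]).symm⟩) (fun _ => by simp)
      -- B's paragraphs
      have hB1 : cestB_paras (cestLines s) = cestB_close (ts'.foldl cestB_step ([], [h0])) := by
        rw [cestB_paras]
        conv_lhs => rw [hls_decomp]
        rw [List.foldl_append, List.foldl_append, cestB_fold_blanks_init _ has,
          cestB_close_blanks _ hbs, hts0, List.foldl_cons]
        rw [show cestB_step ([], []) h0 = ([], [h0]) from by rw [cestB_step]; simp [hh0]]
      have hPne : ∀ p ∈ cestB_close (ts'.foldl cestB_step ([], [h0])), p ≠ [] :=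
        cestB_paras_ne_nil ts' ([], [h0]) (by simp)
      rw [hA1, hB1, cest_join_inter _ hPne]
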